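-- pv_equiv track=rewrite | github.com/Yueleng/interview-preparation | oa/confluence/minimum_sum.py | minSum
-- ===== SOURCE A (Python) =====
-- import heapq
-- import math
-- from typing import List
--
-- def minSum(num: List[int], k: int) -> int:
--     num = [(-1) * i for i in num]
--     heapq.heapify(num)
--     for _ in range(k):
--         # n = -5
--         n = heapq.heappop(num)
--         # math.floor(-5 / 2) = math.floor(-2.5) = -3
--         n = math.floor(n / 2)
--         heapq.heappush(num, n)
--
--     return -sum(num)
-- ===== SOURCE B (Python) =====
-- def minSum(num, k):
--     # sort once + FIFO queue of halved values instead of a heap, with an early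
--     # stop once the maximum reaches a fixed point (0 or 1): O(n log n + min(k, n*log(max)))
--     if not num:
--         return 0
--     M = max(num)
--     if M <= 0:
--         # all elements are <= 0: only the maximum is ever halved, until it hits 0
--         v = M
--         steps = k
--         while steps > 0 and v != 0:
--             v = -((-v) // 2)  # ceil(v/2)
--             steps -= 1
--         return sum(num) - M + v
--     rest = sorted(num, reverse=True)
--     made = []  # halved values, produced in non-increasing order: a queue read via index j
--     i = 0
--     j = 0
--     total = sum(num)
--     steps = k
--     while steps > 0:
--         if i < len(rest) and (j >= len(made) or rest[i] >= made[j]):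
--             v = rest[i]
--             i += 1
--         else:
--             v = made[j]
--             j += 1
--         if v <= 1:
--             break
--         made.append(v - v // 2)
--         total -= v // 2
--         steps -= 1
--     return total
-- ===== Notes on version B (the rewrite author's own statement) =====
-- stated objective: alternative
-- what changed: replaces the heap simulation (negate, heapify, k pops/pushes) by one descending sort plus a FIFO queue of halved values merged by two pointers, with an early stop once the maximum reaches its fixed point (0 or 1) and a closed single-chain loop when all elements are non-positive (intended as faster for large k; measured 2.75x median at the largest size but not consistently across inputs)
import Mathlib
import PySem

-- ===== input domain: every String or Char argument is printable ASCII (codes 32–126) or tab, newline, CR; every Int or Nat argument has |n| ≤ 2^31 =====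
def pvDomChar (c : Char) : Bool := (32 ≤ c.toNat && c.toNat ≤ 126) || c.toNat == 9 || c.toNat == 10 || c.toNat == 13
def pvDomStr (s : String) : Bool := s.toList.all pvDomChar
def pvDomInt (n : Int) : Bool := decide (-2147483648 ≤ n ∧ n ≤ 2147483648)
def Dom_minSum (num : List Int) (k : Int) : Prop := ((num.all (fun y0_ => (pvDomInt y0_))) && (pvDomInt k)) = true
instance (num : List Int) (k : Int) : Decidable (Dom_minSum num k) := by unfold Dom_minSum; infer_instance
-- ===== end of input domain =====

-- B replaces A's heap simulation by one descending sort plus a FIFO queue of halved values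
-- merged by two pointers, with an early stop at the halving fixed point; different algorithm.
-- A mutates its argument list in place (heapify); the equivalence proved is about the return value only.


-- ===== PORT A =====
-- heapq is ported by its contract: the heap's contents are a multiset and heappop returns its
-- minimum (PySem.List.min?); this is exact for every value A's code observes (each popped n, and
-- the final sum, which is order-independent).  math.floor(n / 2) = n // 2 exactly here, because
-- float division is exact for |n| ≤ 2^31 < 2^53 (Dom), and halving never grows the magnitude.
def heapPopPush (h : List Int) : List Int :=
  match PySem.List.min? h (fun y => y) with
  | none => h          -- empty heap: Python raises IndexError; excluded by Pre_
  | some m => h.erase m ++ [PySem.Int.floordiv m 2]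

def minSumLoop : Nat → List Int → List Int
  | 0, h => h
  | t+1, h => minSumLoop t (heapPopPush h)

def minSum (num : List Int) (k : Int) : Int :=
  -(minSumLoop k.toNat (num.map (fun i => (-1) * i))).sum

-- ===== PORT B =====
-- the all-non-positive branch of Source B: halve the maximum until it reaches 0 or the budget ends
def bChain : Nat → Int → Int
  | 0, v => v
  | t+1, v => if v = 0 then v else bChain t (-(PySem.Int.floordiv (-v) 2))

-- Source B's merge loop; rest[i] / made[j] are read only when in range (loop invariant), so
-- getD's default is never consulted on inputs satisfying Pre_.
def bLoop : Nat → List Int → List Int → Nat → Nat → Int → Int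
  | 0, _, _, _, _, total => total
  | t+1, rest, made, i, j, total =>
    if i < rest.length ∧ (made.length ≤ j ∨ made.getD j 0 ≤ rest.getD i 0) then
      let v := rest.getD i 0
      if v ≤ 1 then total
      else bLoop t rest (made ++ [v - PySem.Int.floordiv v 2]) (i+1) j (total - PySem.Int.floordiv v 2)
    else
      let v := made.getD j 0
      if v ≤ 1 then total
      else bLoop t rest (made ++ [v - PySem.Int.floordiv v 2]) i (j+1) (total - PySem.Int.floordiv v 2)

def minSum_alt (num : List Int) (k : Int) : Int :=
  if num = [] then 0
  else
    match PySem.List.max? num (fun y => y) with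
    | none => 0        -- unreachable: num ≠ []
    | some M =>
      if M ≤ 0 then num.sum - M + bChain k.toNat M
      else bLoop k.toNat (PySem.List.sorted num (fun y => y) true) [] 0 0 num.sum

-- ===== PRECONDITION & SPEC =====
-- A raises IndexError (heappop from an empty heap) iff num = [] and k ≥ 1; nothing else is excluded.
-- (on that excluded region B simply returns 0, the empty sum.)
def Pre_minSum (num : List Int) (k : Int) : Prop := num ≠ [] ∨ k ≤ 0
instance (num : List Int) (k : Int) : Decidable (Pre_minSum num k) := by unfold Pre_minSum; infer_instance
def pvWitness_minSum : List Int × Int := ([5, 3, -2], 4)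

def Spec_minSum (num : List Int) (k : Int) (out : Int) : Prop := out = minSum_alt num k
instance (num : List Int) (k : Int) (out : Int) : Decidable (Spec_minSum num k out) := by unfold Spec_minSum; infer_instance

-- ===== CLAIM (what is proved, stated in full; the proofs are below) =====
def Claim_equal_minSum : Prop := ∀ (num : List Int) (k : Int), Dom_minSum num k → Pre_minSum num k → Spec_minSum num k (minSum num k)

-- ===== LEMMAS AND PROOFS =====

lemma min?_id_eq {h : List Int} {m : Int} (hmem : m ∈ h) (hmin : ∀ x ∈ h, m ≤ x) :
    PySem.List.min? h (fun y => y) = some m := by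
  cases hq : PySem.List.min? h (fun y => y) with
  | none => rw [PySem.List.min?_eq_none_iff] at hq; subst hq; simp at hmem
  | some m' =>
    have h2 := PySem.List.min?_isMin hq m hmem
    have h3 := hmin m' (PySem.List.min?_mem hq)
    rw [le_antisymm h2 h3]

lemma heapPopPush_perm {h h' : List Int} (hp : h.Perm h') : (heapPopPush h).Perm (heapPopPush h') := by
  cases hq : PySem.List.min? h (fun y => y) with
  | none =>
    rw [PySem.List.min?_eq_none_iff] at hq; subst hq
    have h0 : h' = [] := List.Perm.eq_nil hp.symm
    subst h0; exact List.Perm.refl _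
  | some m =>
    have hq' : PySem.List.min? h' (fun y => y) = some m :=
      min?_id_eq (hp.mem_iff.mp (PySem.List.min?_mem hq))
        (fun x hx => PySem.List.min?_isMin hq x (hp.mem_iff.mpr hx))
    unfold heapPopPush
    rw [hq, hq']
    exact (hp.erase m).append_right _

lemma minSumLoop_perm {h h' : List Int} (hp : h.Perm h') (t : Nat) :
    (minSumLoop t h).Perm (minSumLoop t h') := by
  induction t generalizing h h' with
  | zero => exact hp
  | succ t ih => exact ih (heapPopPush_perm hp)

lemma minSumLoop_fix {h : List Int} (hfix : (heapPopPush h).Perm h) (t : Nat) :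
    (minSumLoop t h).Perm h := by
  induction t with
  | zero => exact List.Perm.refl h
  | succ t ih => exact ((minSumLoop_perm hfix t).trans ih)

lemma bChain_zero (t : Nat) : bChain t 0 = 0 := by
  cases t <;> simp [bChain]

lemma negPhase : ∀ (t : Nat) (u : Int) (others : List Int), 0 ≤ u → (∀ y ∈ others, u ≤ y) →
    (minSumLoop t (u :: others)).sum = others.sum - bChain t (-u) := by
  intro t
  induction t with
  | zero => intro u others _ _; simp [minSumLoop, bChain]; ring
  | succ t ih =>
    intro u others hu hmin
    have hq : PySem.List.min? (u :: others) (fun y => y) = some u :=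
      min?_id_eq (List.mem_cons_self) (by
        intro x hx
        rcases List.mem_cons.mp hx with h | h
        · omega
        · exact hmin x h)
    have hstep : heapPopPush (u :: others) = others ++ [PySem.Int.floordiv u 2] := by
      unfold heapPopPush; rw [hq]; simp
    by_cases h0 : u = 0
    · subst h0
      have hfix : (heapPopPush ((0:Int) :: others)).Perm ((0:Int) :: others) := by
        rw [hstep]
        have : PySem.Int.floordiv 0 2 = 0 := by decide
        rw [this]
        exact List.perm_append_singleton 0 others
      have := (minSumLoop_fix hfix (t+1)).sum_eq
      rw [this]
      simp [bChain_zero]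
    · have hfd : PySem.Int.floordiv u 2 = u / 2 := PySem.Int.floordiv_eq_ediv_of_pos (by omega)
      have hL : minSumLoop (t+1) (u :: others) = minSumLoop t (others ++ [PySem.Int.floordiv u 2]) := by
        simp [minSumLoop, hstep]
      have hperm : (others ++ [PySem.Int.floordiv u 2]).Perm (PySem.Int.floordiv u 2 :: others) :=
        List.perm_append_singleton _ _
      have hsum := (minSumLoop_perm hperm t).sum_eq
      have hih := ih (PySem.Int.floordiv u 2) others (by rw [hfd]; omega)
        (by intro y hy; have := hmin y hy; rw [hfd]; omega)
      have hR : bChain (t+1) (-u) = bChain t (-(PySem.Int.floordiv u 2)) := by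
        simp [bChain, h0]
      rw [hL, hsum, hih, hR]

lemma head_drop_max {l : List Int} (hp : l.Pairwise (fun a b => b ≤ a)) {i : Nat} (hi : i < l.length) :
    ∀ x ∈ l.drop i, x ≤ l.getD i 0 := by
  have hd : l.drop i = l[i] :: l.drop (i+1) := List.drop_eq_getElem_cons hi
  have hp' : (l.drop i).Pairwise (fun a b => b ≤ a) := hp.drop
  rw [hd] at hp'
  intro x hx
  rw [List.getD_eq_getElem l 0 hi]
  rw [hd] at hx
  rcases List.mem_cons.mp hx with h | h
  · omega
  · exact (List.pairwise_cons.mp hp').1 x h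

lemma fd2 (v : Int) : PySem.Int.floordiv v 2 = v / 2 :=
  PySem.Int.floordiv_eq_ediv_of_pos (by norm_num)

lemma fd_neg2 (v : Int) : PySem.Int.floordiv (-v) 2 = -(v - PySem.Int.floordiv v 2) := by
  rw [fd2, fd2]; omega

lemma ceil_mono {x v : Int} (h : x ≤ v) :
    x - PySem.Int.floordiv x 2 ≤ v - PySem.Int.floordiv v 2 := by
  rw [fd2, fd2]; omega

lemma minSumLoop_sum_fix {h : List Int} {m : Int} (hq : PySem.List.min? h (fun y => y) = some m)
    (hfd : PySem.Int.floordiv m 2 = m) (t : Nat) : (minSumLoop t h).sum = h.sum := by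
  have hfix : (heapPopPush h).Perm h := by
    unfold heapPopPush
    rw [hq]
    show (h.erase m ++ [PySem.Int.floordiv m 2]).Perm h
    rw [hfd]
    exact (List.perm_append_singleton m _).trans (List.perm_cons_erase (PySem.List.min?_mem hq)).symm
  exact (minSumLoop_fix hfix t).sum_eq

lemma min?_neg_eq {C : List Int} {v : Int} (hv : v ∈ C) (hmax : ∀ x ∈ C, x ≤ v) :
    PySem.List.min? (C.map (fun x => -x)) (fun y => y) = some (-v) := by
  apply min?_id_eq
  · exact List.mem_map_of_mem hv
  · intro x hx
    rcases List.mem_map.mp hx with ⟨c, hc, rfl⟩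
    have := hmax c hc
    omega

lemma Aside_step (t : Nat) (P Q : List Int) (v : Int)
    (hmax : ∀ x ∈ P ++ v :: Q, x ≤ v) :
    (minSumLoop (t+1) ((P ++ v :: Q).map (fun x => -x))).sum
      = (minSumLoop t (((P ++ Q) ++ [v - PySem.Int.floordiv v 2]).map (fun x => -x))).sum := by
  have hq : PySem.List.min? ((P ++ v :: Q).map (fun x => -x)) (fun y => y) = some (-v) :=
    min?_neg_eq (List.mem_append_right P (List.mem_cons_self)) hmax
  have hperm1 : ((P ++ v :: Q).map (fun x => -x)).Perm
      (-v :: (P.map (fun x => -x) ++ Q.map (fun x => -x))) := by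
    rw [List.map_append, List.map_cons]
    exact List.perm_middle
  have hperm2 : (((P ++ v :: Q).map (fun x => -x)).erase (-v)).Perm
      (P.map (fun x => -x) ++ Q.map (fun x => -x)) := by
    have := hperm1.erase (-v)
    rwa [List.erase_cons_head] at this
  have hstep : (heapPopPush ((P ++ v :: Q).map (fun x => -x))).Perm
      (((P ++ Q) ++ [v - PySem.Int.floordiv v 2]).map (fun x => -x)) := by
    unfold heapPopPush
    rw [hq]
    show ((((P ++ v :: Q).map (fun x => -x)).erase (-v)) ++ [PySem.Int.floordiv (-v) 2]).Perm _
    rw [fd_neg2]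
    refine (hperm2.append_right [-(v - PySem.Int.floordiv v 2)]).trans ?_
    apply List.Perm.of_eq
    simp [List.map_append]
  have : minSumLoop (t+1) ((P ++ v :: Q).map (fun x => -x))
      = minSumLoop t (heapPopPush ((P ++ v :: Q).map (fun x => -x))) := by
    simp [minSumLoop]
  rw [this, (minSumLoop_perm hstep t).sum_eq]

lemma sum_map_neg' (l : List Int) : (l.map (fun x => -x)).sum = -l.sum := by
  induction l with
  | nil => simp
  | cons a l ih => simp only [List.map_cons, List.sum_cons, ih]; ring

lemma posPhase : ∀ (t : Nat) (rest made : List Int) (i j : Nat),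
    i ≤ rest.length → j ≤ made.length →
    rest.Pairwise (fun a b => b ≤ a) → made.Pairwise (fun a b => b ≤ a) →
    (∃ x ∈ rest.drop i ++ made.drop j, 1 ≤ x) →
    (∀ y ∈ made, ∀ x ∈ rest.drop i ++ made.drop j, x - PySem.Int.floordiv x 2 ≤ y) →
    bLoop t rest made i j (rest.drop i ++ made.drop j).sum
      = -(minSumLoop t ((rest.drop i ++ made.drop j).map (fun x => -x))).sum := by
  intro t
  induction t with
  | zero =>
    intro rest made i j _ _ _ _ _ _
    simp only [bLoop, minSumLoop]
    rw [sum_map_neg']; ring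
  | succ t ih =>
    intro rest made i j hi hj Hr Hm Hmax H6
    by_cases hcond : i < rest.length ∧ (made.length ≤ j ∨ made.getD j 0 ≤ rest.getD i 0)
    · -- pick from rest
      obtain ⟨hil, hor⟩ := hcond
      set v := rest.getD i 0 with hvd
      have hdi : rest.drop i = v :: rest.drop (i+1) := by
        rw [hvd, List.getD_eq_getElem _ _ hil]; exact List.drop_eq_getElem_cons hil
      have hmaxC : ∀ x ∈ rest.drop i ++ made.drop j, x ≤ v := by
        intro x hx
        rcases List.mem_append.mp hx with h | h
        · exact head_drop_max Hr hil x h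
        · by_cases hj' : j < made.length
          · have h1 := head_drop_max Hm hj' x h
            rcases hor with h2 | h2
            · omega
            · omega
          · have he : made.drop j = [] := List.drop_eq_nil_of_le (by omega)
            rw [he] at h; simp at h
      have hmem_v : v ∈ rest.drop i ++ made.drop j := by
        rw [hdi]; exact List.mem_append_left _ (List.mem_cons_self)
      have hBunfold : ∀ tot, bLoop (t+1) rest made i j tot
          = if v ≤ 1 then tot
            else bLoop t rest (made ++ [v - PySem.Int.floordiv v 2]) (i+1) j
              (tot - PySem.Int.floordiv v 2) := by
        intro tot
        simp only [bLoop]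
        rw [if_pos (And.intro hil hor)]
      by_cases hbreak : v ≤ 1
      · have hv1 : v = 1 := by
          obtain ⟨x, hx, hx1⟩ := Hmax; have := hmaxC x hx; omega
        have hq := min?_neg_eq hmem_v hmaxC
        rw [hv1] at hq
        have hfix := minSumLoop_sum_fix hq (by decide) (t+1)
        rw [hBunfold, if_pos hbreak, hfix, sum_map_neg']; ring
      · have hfdv := fd2 v
        have hdrw : (made ++ [v - PySem.Int.floordiv v 2]).drop j
            = made.drop j ++ [v - PySem.Int.floordiv v 2] :=
          List.drop_append_of_le_length hj
        have hxle : ∀ x ∈ rest.drop (i+1) ++ (made ++ [v - PySem.Int.floordiv v 2]).drop j, x ≤ v := by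
          intro x hx
          rw [hdrw] at hx
          rcases List.mem_append.mp hx with h | h
          · exact hmaxC x (List.mem_append_left _ (hdi ▸ List.mem_cons_of_mem _ h))
          · rcases List.mem_append.mp h with h | h
            · exact hmaxC x (List.mem_append_right _ h)
            · simp only [List.mem_singleton] at h; omega
        have hIH := ih rest (made ++ [v - PySem.Int.floordiv v 2]) (i+1) j
          (by omega) (by simp; omega) Hr
          (by
            rw [List.pairwise_append]
            refine ⟨Hm, by simp, ?_⟩
            intro a ha b hb
            simp only [List.mem_singleton] at hb
            subst hb
            exact H6 a ha _ hmem_v)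
          (by
            refine ⟨v - PySem.Int.floordiv v 2, ?_, by omega⟩
            rw [hdrw]
            exact List.mem_append_right _ (List.mem_append_right _ (List.mem_singleton.mpr rfl)))
          (by
            intro y hy x hx
            have hcx : x - PySem.Int.floordiv x 2 ≤ v - PySem.Int.floordiv v 2 :=
              ceil_mono (hxle x hx)
            rcases List.mem_append.mp hy with h | h
            · exact le_trans hcx (H6 y h _ hmem_v)
            · simp only [List.mem_singleton] at h; subst h; exact hcx)
        have htot : (rest.drop (i+1) ++ (made ++ [v - PySem.Int.floordiv v 2]).drop j).sum
            = (rest.drop i ++ made.drop j).sum - PySem.Int.floordiv v 2 := by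
          rw [hdrw, hdi]
          simp [List.sum_append]
          ring
        have hA := Aside_step t [] (rest.drop (i+1) ++ made.drop j) v
          (by
            intro x hx
            simp only [List.nil_append] at hx
            rcases List.mem_cons.mp hx with h | h
            · omega
            · rcases List.mem_append.mp h with h' | h'
              · exact hmaxC x (List.mem_append_left _ (hdi ▸ List.mem_cons_of_mem _ h'))
              · exact hmaxC x (List.mem_append_right _ h'))
        have hC : rest.drop i ++ made.drop j = [] ++ v :: (rest.drop (i+1) ++ made.drop j) := by
          rw [hdi]; simp
        have hshape : ([] ++ (rest.drop (i+1) ++ made.drop j)) ++ [v - PySem.Int.floordiv v 2]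
            = rest.drop (i+1) ++ ((made ++ [v - PySem.Int.floordiv v 2]).drop j) := by
          rw [hdrw]; simp
        rw [hBunfold, if_neg hbreak, ← htot, hIH, hC, hA, hshape]
    · -- pick from made
      have hj' : j < made.length := by
        by_contra hcon
        have he : made.drop j = [] := List.drop_eq_nil_of_le (by omega)
        obtain ⟨x, hx, _⟩ := Hmax
        rw [he, List.append_nil] at hx
        have hil : i < rest.length := by
          by_contra h2
          rw [List.drop_eq_nil_of_le (by omega)] at hx
          simp at hx
        exact hcond ⟨hil, Or.inl (by omega)⟩
      set v := made.getD j 0 with hvd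
      have hdj : made.drop j = v :: made.drop (j+1) := by
        rw [hvd, List.getD_eq_getElem _ _ hj']; exact List.drop_eq_getElem_cons hj'
      have hrestlt : ∀ x ∈ rest.drop i, x ≤ v := by
        intro x hx
        by_cases hil : i < rest.length
        · have hno : ¬(made.length ≤ j ∨ made.getD j 0 ≤ rest.getD i 0) := fun h => hcond ⟨hil, h⟩
          push Not at hno
          have := head_drop_max Hr hil x hx
          omega
        · rw [List.drop_eq_nil_of_le (by omega)] at hx; simp at hx
      have hmaxC : ∀ x ∈ rest.drop i ++ made.drop j, x ≤ v := by
        intro x hx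
        rcases List.mem_append.mp hx with h | h
        · exact hrestlt x h
        · exact head_drop_max Hm hj' x h
      have hmem_v : v ∈ rest.drop i ++ made.drop j := by
        rw [hdj]; exact List.mem_append_right _ (List.mem_cons_self)
      have hBunfold : ∀ tot, bLoop (t+1) rest made i j tot
          = if v ≤ 1 then tot
            else bLoop t rest (made ++ [v - PySem.Int.floordiv v 2]) i (j+1)
              (tot - PySem.Int.floordiv v 2) := by
        intro tot
        simp only [bLoop]
        rw [if_neg hcond]
      by_cases hbreak : v ≤ 1
      · have hv1 : v = 1 := by
          obtain ⟨x, hx, hx1⟩ := Hmax; have := hmaxC x hx; omega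
        have hq := min?_neg_eq hmem_v hmaxC
        rw [hv1] at hq
        have hfix := minSumLoop_sum_fix hq (by decide) (t+1)
        rw [hBunfold, if_pos hbreak, hfix, sum_map_neg']; ring
      · have hfdv := fd2 v
        have hdrw : (made ++ [v - PySem.Int.floordiv v 2]).drop (j+1)
            = made.drop (j+1) ++ [v - PySem.Int.floordiv v 2] :=
          List.drop_append_of_le_length (by omega)
        have hxle : ∀ x ∈ rest.drop i ++ (made ++ [v - PySem.Int.floordiv v 2]).drop (j+1), x ≤ v := by
          intro x hx
          rw [hdrw] at hx
          rcases List.mem_append.mp hx with h | h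
          · exact hrestlt x h
          · rcases List.mem_append.mp h with h | h
            · exact hmaxC x (List.mem_append_right _ (hdj ▸ List.mem_cons_of_mem _ h))
            · simp only [List.mem_singleton] at h; omega
        have hIH := ih rest (made ++ [v - PySem.Int.floordiv v 2]) i (j+1)
          hi (by simp; omega) Hr
          (by
            rw [List.pairwise_append]
            refine ⟨Hm, by simp, ?_⟩
            intro a ha b hb
            simp only [List.mem_singleton] at hb
            subst hb
            exact H6 a ha _ hmem_v)
          (by
            refine ⟨v - PySem.Int.floordiv v 2, ?_, by omega⟩
            rw [hdrw]
            exact List.mem_append_right _ (List.mem_append_right _ (List.mem_singleton.mpr rfl)))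
          (by
            intro y hy x hx
            have hcx : x - PySem.Int.floordiv x 2 ≤ v - PySem.Int.floordiv v 2 :=
              ceil_mono (hxle x hx)
            rcases List.mem_append.mp hy with h | h
            · exact le_trans hcx (H6 y h _ hmem_v)
            · simp only [List.mem_singleton] at h; subst h; exact hcx)
        have htot : (rest.drop i ++ (made ++ [v - PySem.Int.floordiv v 2]).drop (j+1)).sum
            = (rest.drop i ++ made.drop j).sum - PySem.Int.floordiv v 2 := by
          rw [hdrw, hdj]
          simp [List.sum_append]
          ring
        have hA := Aside_step t (rest.drop i) (made.drop (j+1)) v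
          (by
            intro x hx
            rcases List.mem_append.mp hx with h | h
            · exact hrestlt x h
            · rcases List.mem_cons.mp h with h' | h'
              · omega
              · exact hmaxC x (List.mem_append_right _ (hdj ▸ List.mem_cons_of_mem _ h')))
        have hC : rest.drop i ++ made.drop j = rest.drop i ++ v :: made.drop (j+1) := by
          rw [hdj]
        have hshape : (rest.drop i ++ made.drop (j+1)) ++ [v - PySem.Int.floordiv v 2]
            = rest.drop i ++ ((made ++ [v - PySem.Int.floordiv v 2]).drop (j+1)) := by
          rw [hdrw]; simp
        rw [hBunfold, if_neg hbreak, ← htot, hIH, hC, hA, hshape]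

lemma minSumLoop_nil (t : Nat) : minSumLoop t [] = [] := by
  induction t with
  | zero => rfl
  | succ t ih => simpa [minSumLoop, heapPopPush, PySem.List.min?] using ih

lemma neg1_eq : (fun i : Int => (-1) * i) = (fun x : Int => -x) := by
  funext x; ring

lemma minSum_eq_alt (num : List Int) (k : Int) (hpre : num ≠ [] ∨ k ≤ 0) :
    minSum num k = minSum_alt num k := by
  by_cases hnil : num = []
  · subst hnil
    simp [minSum, minSum_alt, minSumLoop_nil]
  · unfold minSum minSum_alt
    rw [neg1_eq, if_neg hnil]
    cases hM : PySem.List.max? num (fun y => y) with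
    | none => rw [PySem.List.max?_eq_none_iff] at hM; exact absurd hM hnil
    | some M =>
      show _ = if M ≤ 0 then num.sum - M + bChain k.toNat M
        else bLoop k.toNat (PySem.List.sorted num (fun y => y) true) [] 0 0 num.sum
      have hMmem := PySem.List.max?_mem hM
      have hMmax := PySem.List.max?_isMax hM
      by_cases hM0 : M ≤ 0
      · rw [if_pos hM0]
        have hperm : (num.map (fun x => -x)).Perm ((-M) :: (num.erase M).map (fun x => -x)) := by
          have h1 : num.Perm (M :: num.erase M) := List.perm_cons_erase hMmem
          simpa using h1.map (fun x => -x)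
        have hnp := negPhase k.toNat (-M) ((num.erase M).map (fun x => -x)) (by omega)
          (by
            intro y hy
            rcases List.mem_map.mp hy with ⟨z, hz, rfl⟩
            have := hMmax z (List.mem_of_mem_erase hz)
            omega)
        rw [(minSumLoop_perm hperm k.toNat).sum_eq, hnp, sum_map_neg']
        have hsum : M + (num.erase M).sum = num.sum := List.sum_erase hMmem
        have : -(-M) = M := by ring
        rw [this]
        omega
      · rw [if_neg hM0]
        have hperm : ((PySem.List.sorted num (fun y => y) true).map (fun x => -x)).Perm
            (num.map (fun x => -x)) :=
          (PySem.List.sorted_perm num (fun y => y) true).map _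
        have hpp := posPhase k.toNat (PySem.List.sorted num (fun y => y) true) [] 0 0
          (by omega) (by simp)
          (by
            have := PySem.List.sorted_pairwise_rev num (fun y => y)
            simpa using this)
          (by simp)
          (by
            refine ⟨M, ?_, by omega⟩
            simp only [List.drop_nil, List.drop_zero, List.append_nil]
            exact (PySem.List.mem_sorted _ _ _ _).mpr hMmem)
          (by simp)
        simp only [List.drop_nil, List.drop_zero, List.append_nil] at hpp
        have hsum : (PySem.List.sorted num (fun y => y) true).sum = num.sum :=
          (PySem.List.sorted_perm num (fun y => y) true).sum_eq
        rw [hsum] at hpp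
        rw [hpp, (minSumLoop_perm hperm k.toNat).sum_eq]

-- ===== VERDICT (by name: the statement is the Claim_ definition above) =====
theorem minSum_spec : Claim_equal_minSum := by
  intro num k _ hpre
  show minSum num k = minSum_alt num k
  exact minSum_eq_alt num k hpre
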